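-- pv_equiv track=rewrite | github.com/carljohanrehn/flair | flair/datasets/biomedical.py | whitespace_tokenize
-- ===== SOURCE A (Python) =====
-- from typing import Union, Callable, Dict, List, Tuple, Iterable
--
-- def whitespace_tokenize(text: str) -> Tuple[List[str], List[int]]:
--     offset = 0
--     tokens = []
--     offsets = []
--     for token in text.split():
--         tokens.append(token)
--         offsets.append(offset)
--         offset += len(token) + 1
--
--     return tokens, offsets
-- ===== SOURCE B (Python) =====
-- def _offsets_from(tokens, start):
--     if not tokens:
--         return []
--     return [start] + _offsets_from(tokens[1:], start + len(tokens[0]) + 1)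
--
--
-- def whitespace_tokenize(text):
--     tokens = text.split()
--     return tokens, _offsets_from(tokens, 0)
-- ===== Notes on version B (the rewrite author's own statement) =====
-- stated objective: alternative
-- what changed: B splits the text first and then derives the offset list by a separate structural recursion over the tokens, instead of A's single loop threading a running offset and appending to two lists.
import Mathlib
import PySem

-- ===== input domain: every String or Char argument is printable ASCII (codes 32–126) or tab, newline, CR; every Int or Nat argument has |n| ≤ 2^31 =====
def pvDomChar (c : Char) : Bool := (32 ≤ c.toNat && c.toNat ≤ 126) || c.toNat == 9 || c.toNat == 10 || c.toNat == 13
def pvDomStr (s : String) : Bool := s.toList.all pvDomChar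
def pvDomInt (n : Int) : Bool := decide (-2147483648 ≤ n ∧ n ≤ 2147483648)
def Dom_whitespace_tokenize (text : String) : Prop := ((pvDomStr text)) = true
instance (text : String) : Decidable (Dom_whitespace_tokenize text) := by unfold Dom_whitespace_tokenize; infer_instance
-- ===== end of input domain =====

-- B: same value; tokens computed first by split, offsets by a separate structural recursion (alternative decomposition).
-- ===== PORT A =====
def whitespace_tokenize (text : String) : List String × List Int :=
  let st := (PySem.Str.split₀ text).foldl
    (fun (s : Int × List String × List Int) token =>
      (s.1 + PySem.Str.len token + 1, s.2.1 ++ [token], s.2.2 ++ [s.1]))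
    (0, [], [])
  (st.2.1, st.2.2)

-- ===== PORT B =====
def offsetsFrom : List String → Int → List Int
  | [], _ => []
  | t :: ts, start => start :: offsetsFrom ts (start + PySem.Str.len t + 1)

def whitespace_tokenize_alt (text : String) : List String × List Int :=
  let tokens := PySem.Str.split₀ text
  (tokens, offsetsFrom tokens 0)

-- ===== PRECONDITION & SPEC =====
def Spec_whitespace_tokenize (text : String) (out : List String × List Int) : Prop := out = whitespace_tokenize_alt text
instance (text : String) (out : List String × List Int) : Decidable (Spec_whitespace_tokenize text out) := by unfold Spec_whitespace_tokenize; infer_instance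

-- ===== CLAIM (what is proved, stated in full; the proofs are below) =====
def Claim_equal_whitespace_tokenize : Prop := ∀ (text : String), Dom_whitespace_tokenize text → Spec_whitespace_tokenize text (whitespace_tokenize text)

-- ===== LEMMAS AND PROOFS =====
theorem foldl_offsets (ts : List String) (off : Int) (toks : List String) (offs : List Int) :
    ts.foldl
      (fun (s : Int × List String × List Int) token =>
        (s.1 + PySem.Str.len token + 1, s.2.1 ++ [token], s.2.2 ++ [s.1]))
      (off, toks, offs)
    = ((ts.foldl (fun a t => a + PySem.Str.len t + 1) off), toks ++ ts, offs ++ offsetsFrom ts off) := by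
  induction ts generalizing off toks offs with
  | nil => simp [offsetsFrom]
  | cons t ts ih =>
    simp only [List.foldl_cons, offsetsFrom]
    rw [ih]; simp

-- ===== VERDICT (by name: the statement is the Claim_ definition above) =====
theorem whitespace_tokenize_spec : Claim_equal_whitespace_tokenize := by
  intro text _
  unfold Spec_whitespace_tokenize whitespace_tokenize whitespace_tokenize_alt
  rw [foldl_offsets]; simp
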